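-- pv_equiv track=rewrite | github.com/VAENeverD1e/DBMS | Backend/app/users/schemas.py | validate_preferences_update
-- ===== SOURCE A (Python) =====
-- def validate_preferences_update(data):
--     """
--     Validate listener preferences update data
--
--     Args:
--         data (dict): Request data to validate
--
--     Returns:
--         tuple: (is_valid: bool, errors: dict)
--     """
--     errors = {}
--
--     # Check if at least one field is provided
--     if not any(key in data for key in ['preference', 'favorite_genre']):
--         errors['general'] = 'At least one field (preference or favorite_genre) must be provided'
--
--     # Validate preference if provided
--     if 'preference' in data:
--         preference = data['preference']
--         if preference and not isinstance(preference, str):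
--             errors['preference'] = 'Preference must be a string'
--         elif preference and len(preference) > 500:
--             errors['preference'] = 'Preference must not exceed 500 characters'
--
--     # Validate favorite_genre if provided
--     if 'favorite_genre' in data:
--         favorite_genre = data['favorite_genre']
--         if favorite_genre and not isinstance(favorite_genre, str):
--             errors['favorite_genre'] = 'Favorite genre must be a string'
--         elif favorite_genre and len(favorite_genre) > 100:
--             errors['favorite_genre'] = 'Favorite genre must not exceed 100 characters'
--
--     return len(errors) == 0, errors
-- ===== SOURCE B (Python) =====
-- def validate_preferences_update(data):
--     # Table-driven: early return on the empty case, then a dict comprehension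
--     # over the field specs. (Values are strings on the stated domain, so the
--     # isinstance branch of the original can never fire.)
--     specs = (('preference', 500, 'Preference must not exceed 500 characters'),
--              ('favorite_genre', 100, 'Favorite genre must not exceed 100 characters'))
--     if all(key not in data for key, _, _ in specs):
--         return False, {'general': 'At least one field (preference or favorite_genre) must be provided'}
--     errors = {key: msg
--               for key, limit, msg in specs
--               if key in data and data[key] and len(data[key]) > limit}
--     return not errors, errors
-- ===== Notes on version B (the rewrite author's own statement) =====
-- stated objective: simpler
-- what changed: Replaces the two duplicated per-field branch blocks by an early return for the no-field case plus one dict comprehension over a table of (key, limit, message) field specs.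
import Mathlib
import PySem

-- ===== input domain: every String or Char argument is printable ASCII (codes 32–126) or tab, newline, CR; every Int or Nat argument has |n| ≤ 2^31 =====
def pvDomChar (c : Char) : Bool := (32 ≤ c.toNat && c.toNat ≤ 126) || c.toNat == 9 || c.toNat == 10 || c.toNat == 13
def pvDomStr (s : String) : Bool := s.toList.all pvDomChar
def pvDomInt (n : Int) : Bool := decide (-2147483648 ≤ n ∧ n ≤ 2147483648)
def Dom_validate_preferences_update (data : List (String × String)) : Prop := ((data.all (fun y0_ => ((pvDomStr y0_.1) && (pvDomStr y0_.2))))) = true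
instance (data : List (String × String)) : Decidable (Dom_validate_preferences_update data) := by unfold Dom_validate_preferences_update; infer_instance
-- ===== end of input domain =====

-- B replaces the two duplicated per-field branch blocks by an early return for the
-- no-field case plus one comprehension over a table of (key, limit, message) specs
-- (objective: simpler). Values are strings under the type convention, so A's
-- isinstance branch can never fire; it is ported as a literally-false test.

-- dict lookup on the association list (first match), shared dict primitive
def pvGetKey (data : List (String × String)) (k : String) : Option String :=
  (data.find? (fun p => p.1 == k)).map (·.2)

-- ===== PORT A =====
-- errors is a dict whose inserted keys ('general', 'preference', 'favorite_genre')
-- are pairwise distinct and fresh, so each insertion is exactly an append.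
def validate_preferences_update (data : List (String × String)) : Bool × (List (String × String)) :=
  let errors : List (String × String) := []
  let errors := if ¬ (["preference", "favorite_genre"].any (fun k => (pvGetKey data k).isSome)) then
      errors ++ [("general", "At least one field (preference or favorite_genre) must be provided")]
    else errors
  let errors := match pvGetKey data "preference" with
    | none => errors
    | some preference =>
      -- 'preference and not isinstance(preference, str)': isinstance is True on String
      if preference ≠ "" ∧ False then errors ++ [("preference", "Preference must be a string")]
      else if preference ≠ "" ∧ PySem.Str.len preference > 500 then
        errors ++ [("preference", "Preference must not exceed 500 characters")]
      else errors
  let errors := match pvGetKey data "favorite_genre" with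
    | none => errors
    | some favorite_genre =>
      if favorite_genre ≠ "" ∧ False then errors ++ [("favorite_genre", "Favorite genre must be a string")]
      else if favorite_genre ≠ "" ∧ PySem.Str.len favorite_genre > 100 then
        errors ++ [("favorite_genre", "Favorite genre must not exceed 100 characters")]
      else errors
  ((errors.length == 0 : Bool), errors)

-- ===== PORT B =====
def validate_preferences_update_alt (data : List (String × String)) : Bool × (List (String × String)) :=
  let specs : List (String × Int × String) :=
    [("preference", 500, "Preference must not exceed 500 characters"),
     ("favorite_genre", 100, "Favorite genre must not exceed 100 characters")]
  if specs.all (fun s => (pvGetKey data s.1).isNone) then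
    (false, [("general", "At least one field (preference or favorite_genre) must be provided")])
  else
    let errors := specs.filterMap (fun s =>
      match pvGetKey data s.1 with
      | some v => if v ≠ "" ∧ PySem.Str.len v > s.2.1 then some (s.1, s.2.2) else none
      | none => none)
    (errors.isEmpty, errors)

-- ===== PRECONDITION & SPEC =====
def Spec_validate_preferences_update (data : List (String × String)) (out : Bool × (List (String × String))) : Prop := out = validate_preferences_update_alt data
instance (data : List (String × String)) (out : Bool × (List (String × String))) : Decidable (Spec_validate_preferences_update data out) := by unfold Spec_validate_preferences_update; infer_instance

-- ===== CLAIM (what is proved, stated in full; the proofs are below) =====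
def Claim_equal_validate_preferences_update : Prop := ∀ (data : List (String × String)), Dom_validate_preferences_update data → Spec_validate_preferences_update data (validate_preferences_update data)

-- ===== LEMMAS AND PROOFS =====

-- ===== VERDICT (by name: the statement is the Claim_ definition above) =====
theorem validate_preferences_update_spec : Claim_equal_validate_preferences_update := by
  intro data _
  unfold Spec_validate_preferences_update validate_preferences_update validate_preferences_update_alt
  cases h1 : pvGetKey data "preference" <;> cases h2 : pvGetKey data "favorite_genre" <;>
    simp [h1, h2] <;> split_ifs <;> simp_all
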